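-- pv_equiv track=rewrite | github.com/CellProfiling/HPA-competition-solutions | conv_is_all_you_need/src/Cropping_Window_Xception/scripts/hpa.py | location_str_to_labels
-- ===== SOURCE A (Python) =====
-- class_name_to_idx = {
--     'cleavage furrow': 16,
--     'midbody': 16,
--     'midbody ring': 16,
--     'nucleus': 0,
--     'vesicles': -1,
--     # ----- above are extra classes ----
--     'nucleoplasm': 0,
--     'nuclear membrane': 1,
--     'nucleoli': 2,
--     'nucleoli fibrillar center': 3,
--     'nuclear speckles': 4,
--     'nuclear bodies': 5,
--     'endoplasmic reticulum': 6,
--     'golgi apparatus': 7,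
--     'peroxisomes': 8,
--     'endosomes': 9,
--     'lysosomes': 10,
--     'intermediate filaments': 11,
--     'actin filaments': 12,
--     'focal adhesion sites': 13,
--     'microtubules': 14,
--     'microtubule ends': 15,
--     'cytokinetic bridge': 16,
--     'mitotic spindle': 17,
--     'microtubule organizing center': 18,
--     'centrosome': 19,
--     'lipid droplets': 20,
--     'plasma membrane': 21,
--     'cell junctions': 22,
--     'mitochondria': 23,
--     'aggresome': 24,
--     'cytosol': 25,
--     'cytoplasmic bodies': 26,
--     'rods & rings': 27
-- }
--
-- def location_str_to_labels(str_, delimiter=' | ', sort=False):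
--     if type(str_) is not str:
--         return 'ERROR EMPTY'
--     elif str_ == '':
--         return 'ERROR EMPTY'
--     else:
--         xs = [class_name_to_idx.get(x) for x in str_.split(delimiter)]
--         if any([x < 0 for x in xs]):
--             return 'ERROR UNKNOWN CLASS'
--         return ' '.join([str(x) for x in xs])
-- ===== SOURCE B (Python) =====
-- class_name_to_idx = {
--     'cleavage furrow': 16,
--     'midbody': 16,
--     'midbody ring': 16,
--     'nucleus': 0,
--     'vesicles': -1,
--     # ----- above are extra classes ----
--     'nucleoplasm': 0,
--     'nuclear membrane': 1,
--     'nucleoli': 2,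
--     'nucleoli fibrillar center': 3,
--     'nuclear speckles': 4,
--     'nuclear bodies': 5,
--     'endoplasmic reticulum': 6,
--     'golgi apparatus': 7,
--     'peroxisomes': 8,
--     'endosomes': 9,
--     'lysosomes': 10,
--     'intermediate filaments': 11,
--     'actin filaments': 12,
--     'focal adhesion sites': 13,
--     'microtubules': 14,
--     'microtubule ends': 15,
--     'cytokinetic bridge': 16,
--     'mitotic spindle': 17,
--     'microtubule organizing center': 18,
--     'centrosome': 19,
--     'lipid droplets': 20,
--     'plasma membrane': 21,
--     'cell junctions': 22,
--     'mitochondria': 23,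
--     'aggresome': 24,
--     'cytosol': 25,
--     'cytoplasmic bodies': 26,
--     'rods & rings': 27
-- }
--
-- def location_str_to_labels(str_, delimiter=' | ', sort=False):
--     # No split()/token list: peel one token at a time with partition and
--     # build the output string directly.
--     if type(str_) is not str or str_ == '':
--         return 'ERROR EMPTY'
--     out = ''
--     rest = str_
--     while True:
--         token, found, rest = rest.partition(delimiter)
--         idx = class_name_to_idx.get(token)
--         if idx < 0:
--             return 'ERROR UNKNOWN CLASS'
--         out = out + ' ' + str(idx) if out else str(idx)
--         if not found:
--             return out
-- ===== Notes on version B (the rewrite author's own statement) =====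
-- stated objective: alternative
-- what changed: A splits the whole string into a token list and makes three comprehension passes over it (dict lookups, an any() validity pass, a join of stringified indices); B never builds a token list: a single while loop peels one token at a time with str.partition and concatenates the label digits onto the output string directly.
import Mathlib
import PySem

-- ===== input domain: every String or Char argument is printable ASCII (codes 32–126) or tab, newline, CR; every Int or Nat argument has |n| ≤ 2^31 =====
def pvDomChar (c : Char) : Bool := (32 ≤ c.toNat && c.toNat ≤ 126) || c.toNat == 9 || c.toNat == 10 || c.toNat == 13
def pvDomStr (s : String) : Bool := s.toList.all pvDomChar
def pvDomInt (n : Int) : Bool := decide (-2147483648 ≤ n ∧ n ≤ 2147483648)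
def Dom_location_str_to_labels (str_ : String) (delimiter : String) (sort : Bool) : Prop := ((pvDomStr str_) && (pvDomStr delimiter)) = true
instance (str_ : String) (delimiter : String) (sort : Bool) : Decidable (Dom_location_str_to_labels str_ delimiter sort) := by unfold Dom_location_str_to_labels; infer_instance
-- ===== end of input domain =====

-- B replaces A's split()+three list comprehensions (map to indices / any() / join) by
-- partition-based peeling: one while loop that cuts one token at a time off the string and
-- builds the output string directly (no token list, no join); same return value on Pre_.
set_option maxRecDepth 8192


-- ===== PORT A =====
-- the module constant class_name_to_idx (shared verbatim by both Pythons)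
def pvClassNameToIdx : PySem.Dict String Int := PySem.Dict.ofList [
  ("cleavage furrow", 16), ("midbody", 16), ("midbody ring", 16), ("nucleus", 0),
  ("vesicles", -1), ("nucleoplasm", 0), ("nuclear membrane", 1), ("nucleoli", 2),
  ("nucleoli fibrillar center", 3), ("nuclear speckles", 4), ("nuclear bodies", 5),
  ("endoplasmic reticulum", 6), ("golgi apparatus", 7), ("peroxisomes", 8),
  ("endosomes", 9), ("lysosomes", 10), ("intermediate filaments", 11),
  ("actin filaments", 12), ("focal adhesion sites", 13), ("microtubules", 14),
  ("microtubule ends", 15), ("cytokinetic bridge", 16), ("mitotic spindle", 17),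
  ("microtubule organizing center", 18), ("centrosome", 19), ("lipid droplets", 20),
  ("plasma membrane", 21), ("cell junctions", 22), ("mitochondria", 23),
  ("aggresome", 24), ("cytosol", 25), ("cytoplasmic bodies", 26), ("rods & rings", 27)]

-- `type(str_) is not str` is always False under the type convention (str_ : String), so that
-- branch is dropped.  str_.split(delimiter) → PySem.Str.split? (none = ValueError on empty
-- delimiter, excluded by Pre_).  `x < 0` on x = None raises TypeError in Python: Pre_ excludes
-- any input whose split contains a token missing from the dict; the port's `none => true` arm
-- is unreachable inside Pre_.
def location_str_to_labels (str_ : String) (delimiter : String) (sort : Bool) : String :=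
  if str_ = "" then "ERROR EMPTY"
  else
    match PySem.Str.split? str_ delimiter with
    | none => ""   -- ValueError: empty separator; outside Pre_
    | some toks =>
      let xs := toks.map (fun x => pvClassNameToIdx.get? x)
      if (xs.map (fun x => match x with
            | none => true          -- Python: TypeError here; outside Pre_
            | some v => decide (v < 0))).any id
      then "ERROR UNKNOWN CLASS"
      else PySem.Str.join " " (xs.map (fun x => match x with
            | none => "None"        -- str(None); unreachable (error branch taken first)
            | some v => PySem.Int.toStr v))

-- ===== PORT B =====
-- termination helper for the peel loop: a found delimiter occurrence strictly shrinks the rest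
theorem pv_drop_lt (s delim : List Char) (hd : delim ≠ [])
    (hi : PySem.Chars.find s delim ≠ -1) :
    (s.drop ((PySem.Chars.find s delim).toNat + delim.length)).length < s.length := by
  have hge : -1 ≤ PySem.Chars.find s delim := PySem.Chars.neg_one_le_find s delim
  have h0 : 0 ≤ PySem.Chars.find s delim := by omega
  obtain ⟨hpre, -⟩ := PySem.Chars.find_spec h0
  have hlen : delim.length ≤ (List.drop (PySem.Chars.find s delim).toNat s).length :=
    hpre.length_le
  have hdl : 1 ≤ delim.length := List.length_pos_of_ne_nil hd
  simp only [List.length_drop] at hlen ⊢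
  omega

-- the while loop of Source B: rest.partition(delimiter) = (token, found, rest'); the token is
-- looked up (`idx < 0` raises TypeError on a missing token, as in A: the `none` arm marks it,
-- outside Pre_), a negative value returns the error string, otherwise the label is appended
-- to `out` (with a separating space unless out is still empty) and the loop goes on
-- while the delimiter was found.  `partition` is ported by hand via Chars.find (index of the
-- first occurrence, -1 if none), exact for a non-empty separator; the delim = [] guard marks
-- Python's ValueError (the caller guards it, outside Pre_).
def pvPeel (delim : List Char) (s : List Char) (out : List Char) : List Char :=
  if hdelim : delim = [] then []  -- s.partition('') raises ValueError; unreachable (caller guards)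
  else if hi : PySem.Chars.find s delim = -1 then
    -- no occurrence: token = s, found = '' → last iteration
    match pvClassNameToIdx.get? (String.ofList s) with
    | none => "ERROR UNKNOWN CLASS".toList
    | some v =>
      if v < 0 then "ERROR UNKNOWN CLASS".toList
      else if out = [] then PySem.Int.toChars v else out ++ ' ' :: PySem.Int.toChars v
  else
    match pvClassNameToIdx.get? (String.ofList (s.take (PySem.Chars.find s delim).toNat)) with
    | none => "ERROR UNKNOWN CLASS".toList
    | some v =>
      if v < 0 then "ERROR UNKNOWN CLASS".toList
      else pvPeel delim (s.drop ((PySem.Chars.find s delim).toNat + delim.length))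
             (if out = [] then PySem.Int.toChars v else out ++ ' ' :: PySem.Int.toChars v)
termination_by s.length
decreasing_by exact pv_drop_lt s delim hdelim hi

def location_str_to_labels_alt (str_ : String) (delimiter : String) (sort : Bool) : String :=
  if str_ = "" then "ERROR EMPTY"
  else if delimiter = "" then ""  -- partition raises ValueError; outside Pre_
  else String.ofList (pvPeel delimiter.toList str_.toList [])

-- ===== PRECONDITION & SPEC =====
-- Pre_ excludes exactly the inputs where Python A raises: a non-empty str_ with an empty
-- delimiter (ValueError from split), and a split containing a token not in class_name_to_idx
-- (TypeError from None < 0).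
def Pre_location_str_to_labels (str_ : String) (delimiter : String) (sort : Bool) : Prop :=
  str_ = "" ∨ (delimiter ≠ "" ∧
    ((PySem.Str.split? str_ delimiter).getD []).all (fun t => pvClassNameToIdx.contains t) = true)
instance (str_ : String) (delimiter : String) (sort : Bool) : Decidable (Pre_location_str_to_labels str_ delimiter sort) := by unfold Pre_location_str_to_labels; infer_instance

def pvWitness_location_str_to_labels : String × String × Bool := ("", " | ", false)

def Spec_location_str_to_labels (str_ : String) (delimiter : String) (sort : Bool) (out : String) : Prop := out = location_str_to_labels_alt str_ delimiter sort
instance (str_ : String) (delimiter : String) (sort : Bool) (out : String) : Decidable (Spec_location_str_to_labels str_ delimiter sort out) := by unfold Spec_location_str_to_labels; infer_instance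

-- ===== CLAIM (what is proved, stated in full; the proofs are below) =====
def Claim_equal_location_str_to_labels : Prop := ∀ (str_ : String) (delimiter : String) (sort : Bool), Dom_location_str_to_labels str_ delimiter sort → Pre_location_str_to_labels str_ delimiter sort → Spec_location_str_to_labels str_ delimiter sort (location_str_to_labels str_ delimiter sort)

-- ===== LEMMAS AND PROOFS =====

-- ---- find: first-occurrence characterisation ----
theorem pv_find_eq_of (s delim : List Char) (k : Nat)
    (h1 : delim <+: s.drop k) (h2 : ∀ i < k, ¬ delim <+: s.drop i) :
    PySem.Chars.find s delim = k := by
  have hin : delim <:+: s := h1.isInfix.trans (List.drop_suffix k s).isInfix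
  have h0 : 0 ≤ PySem.Chars.find s delim := (PySem.Chars.find_nonneg_iff s delim).mpr hin
  obtain ⟨hp, hmin⟩ := PySem.Chars.find_spec h0
  rcases lt_trichotomy (PySem.Chars.find s delim).toNat k with h | h | h
  · exact absurd hp (h2 _ h)
  · omega
  · exact absurd h1 (hmin _ h)

theorem pv_find_prefix (l delim : List Char) (hp : delim <+: l) :
    PySem.Chars.find l delim = 0 := by
  simpa using pv_find_eq_of l delim 0 (by simpa using hp) (by omega)

theorem pv_find_cons (c : Char) (rest delim : List Char)
    (hp : ¬ delim <+: (c :: rest)) :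
    PySem.Chars.find (c :: rest) delim =
      (if PySem.Chars.find rest delim = -1 then -1 else PySem.Chars.find rest delim + 1) := by
  split
  · rename_i hr
    rw [PySem.Chars.find_eq_neg_one_iff] at hr ⊢
    intro hin
    obtain ⟨j, hj⟩ := (PySem.Chars.exists_prefix_drop_iff_isIn delim (c::rest)).mpr
      ((PySem.Chars.isIn_iff_infix delim (c::rest)).mpr hin)
    match j, hj with
    | 0, hj => exact hp (by simpa using hj)
    | j+1, hj => exact hr ((hj.isInfix).trans (List.drop_suffix j rest).isInfix)
  · rename_i hr
    have hge : -1 ≤ PySem.Chars.find rest delim := PySem.Chars.neg_one_le_find rest delim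
    have h0 : 0 ≤ PySem.Chars.find rest delim := by omega
    obtain ⟨hp2, hmin⟩ := PySem.Chars.find_spec h0
    have : PySem.Chars.find (c :: rest) delim = ((PySem.Chars.find rest delim).toNat + 1 : Nat) := by
      apply pv_find_eq_of
      · simpa using hp2
      · intro i hi
        match i, hi with
        | 0, _ => simpa using hp
        | i+1, hi => exact fun hcon => hmin i (by omega) (by simpa using hcon)
    rw [this]; push_cast; omega

-- ---- the find-based tokenizer (proof-only reference; B's peel and A's splitOn both equal it) ----
def pvTokens (delim : List Char) (s : List Char) : List (List Char) :=
  if hdelim : delim = [] then [s]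
  else if hi : PySem.Chars.find s delim = -1 then [s]
  else s.take (PySem.Chars.find s delim).toNat ::
    pvTokens delim (s.drop ((PySem.Chars.find s delim).toNat + delim.length))
termination_by s.length
decreasing_by exact pv_drop_lt s delim hdelim hi

theorem pvTokens_nil (delim : List Char) (hd : delim ≠ []) : pvTokens delim [] = [[]] := by
  rw [pvTokens]
  have : PySem.Chars.find [] delim = -1 := by
    rw [PySem.Chars.find_eq_neg_one_iff]
    intro h; exact hd (List.eq_nil_of_infix_nil h)
  simp [hd, this]

theorem pvTokens_cons (delim : List Char) (hd : delim ≠ []) (c : Char) (rest : List Char) :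
    pvTokens delim (c :: rest) =
      if delim.isPrefixOf (c :: rest)
      then [] :: pvTokens delim ((c :: rest).drop delim.length)
      else (pvTokens delim rest).modifyHead (c :: ·) := by
  by_cases hpre : delim <+: (c :: rest)
  · have hpb : delim.isPrefixOf (c :: rest) = true := List.isPrefixOf_iff_prefix.mpr hpre
    have hf : PySem.Chars.find (c :: rest) delim = 0 := pv_find_prefix _ _ hpre
    rw [pvTokens, dif_neg hd, dif_neg (by rw [hf]; omega), if_pos hpb, hf]
    simp
  · have hpb : delim.isPrefixOf (c :: rest) = false := by
      rw [Bool.eq_false_iff]; intro h; exact hpre (List.isPrefixOf_iff_prefix.mp h)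
    have hf := pv_find_cons c rest delim hpre
    rw [if_neg (by simp [hpb])]
    by_cases hr : PySem.Chars.find rest delim = -1
    · rw [hr, if_pos rfl] at hf
      rw [pvTokens, dif_neg hd, dif_pos hf]
      rw [pvTokens, dif_neg hd, dif_pos hr]
      simp
    · rw [if_neg hr] at hf
      have hge : -1 ≤ PySem.Chars.find rest delim := PySem.Chars.neg_one_le_find rest delim
      have h0 : 0 ≤ PySem.Chars.find rest delim := by omega
      have hfne : PySem.Chars.find (c :: rest) delim ≠ -1 := by rw [hf]; omega
      rw [pvTokens, dif_neg hd, dif_neg hfne]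
      conv_rhs => rw [pvTokens, dif_neg hd, dif_neg hr]
      have htn : (PySem.Chars.find (c :: rest) delim).toNat = (PySem.Chars.find rest delim).toNat + 1 := by
        rw [hf]; omega
      rw [htn]
      simp [List.modifyHead]
      congr 1
      rw [show (PySem.Chars.find rest delim).toNat + 1 + delim.length
            = ((PySem.Chars.find rest delim).toNat + delim.length) + 1 by omega,
          List.drop_succ_cons]

theorem pv_modifyHead_modifyHead {α : Type} (f g : α → α)
    (xs : List α) : (xs.modifyHead g).modifyHead f = xs.modifyHead (f ∘ g) := by
  cases xs <;> simp

-- ---- splitOn's scanning loop computes pvTokens ----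
theorem pv_go_spec (delim : List Char) (hd : delim ≠ []) :
    ∀ (fuel : Nat) (l : List Char), l.length < fuel → ∀ (cur : List Char) (acc : List (List Char)),
      PySem.Chars.splitOn.go delim fuel l cur acc
        = acc.reverse ++ (pvTokens delim l).modifyHead (cur.reverse ++ ·) := by
  intro fuel
  induction fuel with
  | zero => intro l hl; omega
  | succ f ih =>
    intro l hl cur acc
    cases l with
    | nil =>
      rw [PySem.Chars.splitOn.go]
      · rw [pvTokens_nil delim hd]; simp
      · simp
    | cons c rest =>
      rw [PySem.Chars.splitOn.go, pvTokens_cons delim hd]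
      by_cases hp : delim.isPrefixOf (c :: rest)
      · rw [if_pos hp, if_pos hp]
        have hlen : ((c :: rest).drop delim.length).length < f := by
          have h1 : 1 ≤ delim.length := List.length_pos_of_ne_nil hd
          simp only [List.length_drop, List.length_cons] at *
          omega
        rw [ih _ hlen [] (cur.reverse :: acc)]
        simp [List.modifyHead]
        cases h : pvTokens delim ((c :: rest).drop delim.length) <;> simp
      · rw [if_neg hp, if_neg hp]
        have hlen : rest.length < f := by simp at hl; omega
        rw [ih rest hlen (c :: cur) acc, pv_modifyHead_modifyHead]
        cases pvTokens delim rest <;> simp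

theorem pv_splitOn_eq (s delim : List Char) (hd : delim ≠ []) :
    PySem.Chars.splitOn s delim = pvTokens delim s := by
  unfold PySem.Chars.splitOn
  rw [pv_go_spec delim hd (s.length + 1) s (by omega) [] []]
  cases pvTokens delim s <;> simp

-- ---- B's peel as a run over the token list ----
def pvRun : List (List Char) → List Char → List Char
  | [], out => out
  | t :: rest, out =>
    match pvClassNameToIdx.get? (String.ofList t) with
    | none => "ERROR UNKNOWN CLASS".toList
    | some v =>
      if v < 0 then "ERROR UNKNOWN CLASS".toList
      else pvRun rest (if out = [] then PySem.Int.toChars v else out ++ ' ' :: PySem.Int.toChars v)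

theorem pvPeel_eq_run (delim : List Char) (hd : delim ≠ []) : ∀ (s out : List Char),
    pvPeel delim s out = pvRun (pvTokens delim s) out := by
  have key : ∀ (n : Nat) (s : List Char), s.length ≤ n → ∀ out,
      pvPeel delim s out = pvRun (pvTokens delim s) out := by
    intro n
    induction n with
    | zero =>
      intro s hs out
      have hnil : s = [] := List.eq_nil_of_length_eq_zero (by omega)
      subst hnil
      have hf : PySem.Chars.find [] delim = -1 := by
        rw [PySem.Chars.find_eq_neg_one_iff]
        exact fun h => hd (List.eq_nil_of_infix_nil h)
      rw [pvTokens_nil delim hd, pvPeel, dif_neg hd, dif_pos hf]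
      cases hget : pvClassNameToIdx.get? (String.ofList []) with
      | none => simp [pvRun, hget]
      | some v => by_cases hv : v < 0 <;> simp [pvRun, hget, hv]
    | succ n ih =>
      intro s hs out
      rw [pvPeel, dif_neg hd, pvTokens, dif_neg hd]
      by_cases hi : PySem.Chars.find s delim = -1
      · rw [dif_pos hi, dif_pos hi]
        cases hget : pvClassNameToIdx.get? (String.ofList s) with
        | none => simp [pvRun, hget]
        | some v => by_cases hv : v < 0 <;> simp [pvRun, hget, hv]
      · rw [dif_neg hi, dif_neg hi]
        cases hget : pvClassNameToIdx.get? (String.ofList (s.take (PySem.Chars.find s delim).toNat)) with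
        | none => simp [pvRun, hget]
        | some v =>
          by_cases hv : v < 0
          · simp [pvRun, hget, hv]
          · have hlt := pv_drop_lt s delim hd hi
            simp only [pvRun, hget, if_neg hv]
            exact ih _ (by omega) _
  exact fun s out => key s.length s le_rfl out

-- ---- pvRun vs A's three passes ----
def pvDig (t : List Char) : List Char :=
  match pvClassNameToIdx.get? (String.ofList t) with
  | none => []
  | some v => PySem.Int.toChars v

def pvStep (o t : List Char) : List Char :=
  if o = [] then pvDig t else o ++ ' ' :: pvDig t

def pvBad (t : List Char) : Bool :=
  match pvClassNameToIdx.get? (String.ofList t) with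
  | none => true
  | some v => decide (v < 0)

theorem pvRun_eq (toks : List (List Char)) : ∀ out,
    pvRun toks out =
      if (toks.map pvBad).any id then "ERROR UNKNOWN CLASS".toList
      else toks.foldl pvStep out := by
  induction toks with
  | nil => intro out; simp [pvRun]
  | cons t rest ih =>
    intro out
    simp only [pvRun, List.map_cons, List.any_cons, List.foldl_cons]
    cases hget : pvClassNameToIdx.get? (String.ofList t) with
    | none => simp [pvBad, hget]
    | some v =>
      by_cases hv : v < 0
      · simp [pvBad, hget, hv]
      · dsimp only
        rw [if_neg hv, ih]
        have hb : pvBad t = false := by simp [pvBad, hget, hv]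
        simp only [hb, id, Bool.false_or]
        congr 1
        simp [pvStep, pvDig, hget]

theorem pv_foldl_ne_nil (toks : List (List Char)) : ∀ (o : List Char), o ≠ [] →
    toks.foldl pvStep o = o ++ toks.flatMap (fun t => ' ' :: pvDig t) := by
  induction toks with
  | nil => intro o _; simp
  | cons t rest ih =>
    intro o ho
    simp only [List.foldl_cons, List.flatMap_cons]
    rw [show pvStep o t = o ++ ' ' :: pvDig t by simp [pvStep, ho]]
    rw [ih _ (by simp)]
    simp

theorem pv_join_flat (d : List Char) (ds : List (List Char)) :
    PySem.Chars.join [' '] (d :: ds) = d ++ ds.flatMap (fun t => ' ' :: t) := by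
  induction ds generalizing d with
  | nil => simp [PySem.Chars.join_singleton]
  | cons e es ih =>
    rw [PySem.Chars.join_cons_cons, ih e]
    simp

theorem pv_foldl_join (toks : List (List Char)) (hne : ∀ t ∈ toks, pvDig t ≠ []) :
    toks.foldl pvStep [] = PySem.Chars.join [' '] (toks.map pvDig) := by
  cases toks with
  | nil => simp [PySem.Chars.join_nil]
  | cons t rest =>
    simp only [List.foldl_cons, List.map_cons]
    rw [show pvStep [] t = pvDig t by simp [pvStep]]
    rw [pv_foldl_ne_nil rest (pvDig t) (hne t (by simp)), pv_join_flat]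
    congr 1
    rw [List.flatMap_map]

-- ---- str(n) is never the empty string ----
theorem pv_toDigitsCore_len (b : Nat) : ∀ (fuel n : Nat) (ds : List Char),
    ds.length ≤ (Nat.toDigitsCore b fuel n ds).length := by
  intro fuel
  induction fuel with
  | zero => intro n ds; simp [Nat.toDigitsCore]
  | succ f ih =>
    intro n ds
    simp only [Nat.toDigitsCore]
    split
    · simp
    · exact le_trans (by simp) (ih _ _)

theorem pv_toChars_ne_nil (n : Int) : PySem.Int.toChars n ≠ [] := by
  unfold PySem.Int.toChars
  split
  · simp
  · unfold Nat.toDigits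
    simp only [Nat.toDigitsCore]
    split
    · simp
    · intro h
      have := pv_toDigitsCore_len 10 n.toNat (n.toNat / 10) [(n.toNat % 10).digitChar]
      rw [h] at this
      simp at this

theorem pv_toList_ne_nil (s : String) (h : s ≠ "") : s.toList ≠ [] := by
  intro hc
  apply h
  have := String.ofList_toList (s := s)
  rw [hc] at this
  exact this.symm

-- ===== VERDICT (by name: the statement is the Claim_ definition above) =====
theorem location_str_to_labels_spec : Claim_equal_location_str_to_labels := by
  intro str_ delimiter sort _ hpre
  unfold Spec_location_str_to_labels
  by_cases hs : str_ = ""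
  · simp [location_str_to_labels, location_str_to_labels_alt, hs]
  · have hdel : delimiter ≠ "" := by
      rcases hpre with h | ⟨h, -⟩
      · exact absurd h hs
      · exact h
    have hdl : delimiter.toList ≠ [] := pv_toList_ne_nil _ hdel
    have hsplit : PySem.Str.split? str_ delimiter
        = some ((pvTokens delimiter.toList str_.toList).map String.ofList) := by
      unfold PySem.Str.split? PySem.Chars.split?
      rw [if_neg (by simpa using hdl)]
      rw [pv_splitOn_eq _ _ hdl]
      rfl
    unfold location_str_to_labels location_str_to_labels_alt
    rw [if_neg hs, if_neg hs, if_neg hdel, hsplit]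
    rw [pvPeel_eq_run _ hdl, pvRun_eq]
    simp only [List.map_map]
    have hcomp : ((fun x => match x with | none => true | some v => decide (v < 0))
        ∘ (fun x => pvClassNameToIdx.get? x) ∘ String.ofList) = pvBad := by
      funext t; simp only [Function.comp]; rfl
    rw [hcomp]
    by_cases hbad : ((pvTokens delimiter.toList str_.toList).map pvBad).any id = true
    · rw [if_pos hbad, if_pos hbad]
      simp
    · rw [if_neg hbad, if_neg hbad]
      have hmem : ∀ t ∈ pvTokens delimiter.toList str_.toList,
          ∃ v, pvClassNameToIdx.get? (String.ofList t) = some v ∧ ¬ v < 0 := by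
        intro t ht
        have : pvBad t = false := by
          by_contra hc
          exact hbad (List.any_eq_true.mpr ⟨pvBad t, List.mem_map_of_mem ht, by simpa using hc⟩)
        unfold pvBad at this
        cases hget : pvClassNameToIdx.get? (String.ofList t) with
        | none => rw [hget] at this; simp at this
        | some v => rw [hget] at this; simp at this; exact ⟨v, rfl, by simpa using this⟩
      have hne : ∀ t ∈ pvTokens delimiter.toList str_.toList, pvDig t ≠ [] := by
        intro t ht
        obtain ⟨v, hv, -⟩ := hmem t ht
        unfold pvDig
        rw [hv]
        exact pv_toChars_ne_nil v
      rw [pv_foldl_join _ hne]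
      have hA : (PySem.Str.join " "
          (List.map ((fun x => match x with | none => "None" | some v => PySem.Int.toStr v)
              ∘ (fun x => pvClassNameToIdx.get? x) ∘ String.ofList)
            (pvTokens delimiter.toList str_.toList))).toList
          = PySem.Chars.join [' '] ((pvTokens delimiter.toList str_.toList).map pvDig) := by
        rw [PySem.Str.toList_join]
        congr 1
        rw [List.map_map]
        apply List.map_congr_left
        intro t ht
        obtain ⟨v, hv, -⟩ := hmem t ht
        simp only [Function.comp, hv, pvDig]
        exact PySem.Int.toList_toStr v
      rw [← hA, String.ofList_toList]
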